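-- pv_equiv track=rewrite | github.com/AMYMEME/algorithm-study | common/2021.08.19/maplejh_1328.py | solution
-- ===== SOURCE A (Python) =====
-- from math import comb, factorial
--
-- def solution(h, s):
--     if h == s:
--         return 1
--     if s == 1:
--         return factorial(h - 1)
--     tmp = 0
--     for j in range(h - s + 1):
--         tmp += (solution(h - 1 - j, s - 1) * comb(h - 1, j) * factorial(j))
--     return tmp
-- ===== SOURCE B (Python) =====
-- def solution(h, s):
--     # bottom-up DP over the two-term recurrence c(n,k) = c(n-1,k-1) + (n-1)*c(n-1,k)
--     if h == s:
--         return 1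
--     if s < 1 or h < s:
--         return 0
--     row = [1] + [0] * s          # row[k] = c(0, k)
--     for n in range(1, h + 1):
--         row = [0] + [row[k - 1] + (n - 1) * row[k] for k in range(1, s + 1)]
--     return row[s]
-- ===== Notes on version B (the rewrite author's own statement) =====
-- stated objective: alternative
-- what changed: replaces the exponential sum-over-first-cycle recursion with a bottom-up DP row over the two-term Stirling-first-kind recurrence c(n,k)=c(n-1,k-1)+(n-1)c(n-1,k)
import Mathlib
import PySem

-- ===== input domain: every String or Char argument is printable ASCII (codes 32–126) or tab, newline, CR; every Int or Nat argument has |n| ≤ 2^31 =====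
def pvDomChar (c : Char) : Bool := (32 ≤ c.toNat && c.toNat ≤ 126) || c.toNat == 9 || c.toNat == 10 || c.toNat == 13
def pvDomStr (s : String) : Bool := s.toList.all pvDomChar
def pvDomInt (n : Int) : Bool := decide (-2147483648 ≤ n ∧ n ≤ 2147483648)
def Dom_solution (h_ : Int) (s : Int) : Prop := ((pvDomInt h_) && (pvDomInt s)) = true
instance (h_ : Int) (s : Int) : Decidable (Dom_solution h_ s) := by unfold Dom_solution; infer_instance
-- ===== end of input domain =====

-- B replaces A's sum-over-first-cycle recursion by a bottom-up DP row over the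
-- two-term Stirling-first-kind recurrence c(n,k) = c(n-1,k-1) + (n-1)*c(n-1,k)  (objective: alternative).

-- ===== PORT A =====
-- math.factorial n (raises ValueError for n < 0: such calls lie outside Pre_; 0 there is unreached)
def pyFact (n : Int) : Int := if n < 0 then 0 else (Nat.factorial n.toNat : Int)
-- math.comb n k (raises for negative arguments; such calls are unreached inside Pre_)
def pyComb (n k : Int) : Int := if n < 0 ∨ k < 0 then 0 else (Nat.choose n.toNat k.toNat : Int)

-- A's recursion, made total with fuel: every recursive call decreases s by 1, so on Pre_ the
-- fuel s.toNat + 1 is never exhausted (outside Pre_ the Python recursion does not terminate).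
def solutionFuel : Nat → Int → Int → Int
  | 0, _, _ => 0
  | f + 1, h, s =>
    if h = s then 1
    else if s = 1 then pyFact (h - 1)
    else
      -- for j in range(h - s + 1): tmp += solution(h-1-j, s-1) * comb(h-1, j) * factorial(j)
      (List.range (h - s + 1).toNat).foldl
        (fun (tmp : Int) (j : Nat) =>
          tmp + solutionFuel f (h - 1 - (j : Int)) (s - 1) * pyComb (h - 1) (j : Int) * pyFact (j : Int))
        0

def solution (h_ : Int) (s : Int) : Int := solutionFuel (s.toNat + 1) h_ s

-- ===== PORT B =====
-- Transliteration of Source B.  All list indices k-1, k, s lie inside the row of length s+1,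
-- so `getD _ 0` is exact for Python's row[...] here.
def solution_alt (h_ : Int) (s : Int) : Int :=
  if h_ = s then 1
  else if s < 1 ∨ h_ < s then 0
  else
    -- row = [1] + [0]*s ; for n in range(1, h+1): row = [0] + [row[k-1]+(n-1)*row[k] for k in range(1, s+1)]
    ((List.range' 1 h_.toNat).foldl
      (fun (row : List Int) (n : Nat) =>
        0 :: (List.range' 1 s.toNat).map
          (fun k => row.getD (k - 1) 0 + ((n : Int) - 1) * row.getD k 0))
      (1 :: List.replicate s.toNat 0)).getD s.toNat 0

-- ===== PRECONDITION & SPEC =====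
-- Pre_ excludes exactly the inputs where Python A does not return: s == 1 with h < 1
-- (factorial(h-1) raises ValueError) and s ≤ 0 with h > s (unbounded recursion, RecursionError).
def Pre_solution (h_ : Int) (s : Int) : Prop :=
  h_ = s ∨ (1 ≤ s ∧ s ≤ h_) ∨ (h_ < s ∧ s ≠ 1)
instance (h_ : Int) (s : Int) : Decidable (Pre_solution h_ s) := by unfold Pre_solution; infer_instance
def pvWitness_solution : Int × Int := (4, 2)

def Spec_solution (h_ : Int) (s : Int) (out : Int) : Prop := out = solution_alt h_ s
instance (h_ : Int) (s : Int) (out : Int) : Decidable (Spec_solution h_ s out) := by unfold Spec_solution; infer_instance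

-- ===== CLAIM (what is proved, stated in full; the proofs are below) =====
def Claim_equal_solution : Prop := ∀ (h_ : Int) (s : Int), Dom_solution h_ s → Pre_solution h_ s → Spec_solution h_ s (solution h_ s)

-- ===== LEMMAS AND PROOFS =====

-- unsigned Stirling numbers of the first kind (the mathematical reference both ports compute)
def stirling : Nat → Nat → Int
  | 0, 0 => 1
  | 0, _ + 1 => 0
  | _ + 1, 0 => 0
  | n + 1, k + 1 => stirling n k + (n : Int) * stirling n (k + 1)

theorem stir_gt (n : Nat) : ∀ k, n < k → stirling n k = 0 := by
  induction n with
  | zero =>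
    intro k hk
    cases k with
    | zero => omega
    | succ k => rfl
  | succ n ih =>
    intro k hk
    cases k with
    | zero => omega
    | succ k =>
      show stirling n k + (n : Int) * stirling n (k + 1) = 0
      rw [ih k (by omega), ih (k + 1) (by omega)]
      ring

theorem stir_diag (n : Nat) : stirling n n = 1 := by
  induction n with
  | zero => rfl
  | succ n ih =>
    show stirling n n + (n : Int) * stirling n (n + 1) = 1
    rw [ih, stir_gt n (n + 1) (by omega)]
    ring

theorem stir_one (n : Nat) : stirling (n + 1) 1 = (Nat.factorial n : Int) := by
  induction n with
  | zero => rfl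
  | succ n ih =>
    show stirling (n + 1) 0 + ((n + 1 : Nat) : Int) * stirling (n + 1) 1 = _
    rw [show stirling (n + 1) 0 = 0 from rfl, ih, Nat.factorial_succ]
    push_cast
    ring

theorem cf_step (m j : Nat) :
    Nat.choose (m + 1) (j + 1) * Nat.factorial (j + 1) = (m + 1) * (Nat.choose m j * Nat.factorial j) := by
  have h := Nat.succ_mul_choose_eq m j
  simp only [Nat.succ_eq_add_one] at h
  calc Nat.choose (m + 1) (j + 1) * Nat.factorial (j + 1)
      = (Nat.choose (m + 1) (j + 1) * (j + 1)) * Nat.factorial j := by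
        rw [Nat.factorial_succ]; ring
    _ = ((m + 1) * Nat.choose m j) * Nat.factorial j := by rw [← h]
    _ = (m + 1) * (Nat.choose m j * Nat.factorial j) := by ring

theorem foldl_add_eq_sum (g : Nat → Int) (l : List Nat) (a : Int) :
    List.foldl (fun acc j => acc + g j) a l = a + (l.map g).sum := by
  induction l generalizing a with
  | nil => simp
  | cons x xs ih => simp [ih]; ring

-- A's sum recurrence equals the two-term recurrence: the identity behind the equivalence
theorem stir_sum (k d : Nat) (hk : 1 ≤ k) :
    ((List.range (d + 1)).map
      (fun j => stirling (k + d - 1 - j) (k - 1) * (Nat.choose (k + d - 1) j : Int) * (Nat.factorial j : Int))).sum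
    = stirling (k + d) k := by
  induction d with
  | zero =>
    rw [show (0 : Nat) + 1 = 1 from rfl, List.range_one]
    simp only [List.map_cons, List.map_nil, List.sum_cons, List.sum_nil,
      Nat.choose_zero_right, Nat.factorial_zero, Nat.add_zero, Nat.sub_zero, Nat.cast_one]
    rw [stir_diag (k - 1), stir_diag k]
    ring
  | succ d ih =>
    rw [List.range_succ_eq_map, List.map_cons, List.map_map, List.sum_cons]
    have htail :
        (List.map ((fun j => stirling (k + (d + 1) - 1 - j) (k - 1) * (Nat.choose (k + (d + 1) - 1) j : Int) * (Nat.factorial j : Int)) ∘ Nat.succ) (List.range (d + 1))).sum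
        = ((k + d : Nat) : Int) * ((List.range (d + 1)).map
            (fun j => stirling (k + d - 1 - j) (k - 1) * (Nat.choose (k + d - 1) j : Int) * (Nat.factorial j : Int))).sum := by
      rw [← List.sum_map_mul_left]
      apply congrArg
      apply List.map_congr_left
      intro j hj
      have hj' : j < d + 1 := List.mem_range.mp hj
      simp only [Function.comp, Nat.succ_eq_add_one]
      have h1 : k + (d + 1) - 1 - (j + 1) = k + d - 1 - j := by omega
      have h2 : k + (d + 1) - 1 = (k + d - 1) + 1 := by omega
      rw [h1, h2]
      have h3 : ((Nat.choose (k + d - 1 + 1) (j + 1) : Nat) : Int) * ((Nat.factorial (j + 1) : Nat) : Int)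
          = ((k + d : Nat) : Int) * (((Nat.choose (k + d - 1) j : Nat) : Int) * ((Nat.factorial j : Nat) : Int)) := by
        rw [← Nat.cast_mul, ← Nat.cast_mul, ← Nat.cast_mul, cf_step (k + d - 1) j,
          show k + d - 1 + 1 = k + d by omega]
      calc stirling (k + d - 1 - j) (k - 1) * (Nat.choose (k + d - 1 + 1) (j + 1) : Int) * (Nat.factorial (j + 1) : Int)
          = stirling (k + d - 1 - j) (k - 1) * ((Nat.choose (k + d - 1 + 1) (j + 1) : Int) * (Nat.factorial (j + 1) : Int)) := by ring
        _ = ((k + d : Nat) : Int) * (stirling (k + d - 1 - j) (k - 1) * (Nat.choose (k + d - 1) j : Int) * (Nat.factorial j : Int)) := by rw [h3]; try ring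
    rw [htail, ih]
    have hfirst : stirling (k + (d + 1) - 1 - 0) (k - 1) * (Nat.choose (k + (d + 1) - 1) 0 : Int) * (Nat.factorial 0 : Int)
        = stirling (k + d) (k - 1) := by
      rw [show k + (d + 1) - 1 - 0 = k + d by omega]
      simp [Nat.factorial]
    rw [hfirst]
    obtain ⟨k', rfl⟩ : ∃ k', k = k' + 1 := ⟨k - 1, by omega⟩
    rw [show k' + 1 + (d + 1) = (k' + 1 + d) + 1 by omega]
    show _ = stirling (k' + 1 + d) k' + ((k' + 1 + d : Nat) : Int) * stirling (k' + 1 + d) (k' + 1)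
    simp only [Nat.add_sub_cancel]

-- A's fueled recursion computes stirling on the triangular domain
theorem fuel_eq : ∀ (f : Nat) (h s : Int), 1 ≤ s → s ≤ h → s.toNat < f →
    solutionFuel f h s = stirling h.toNat s.toNat := by
  intro f
  induction f with
  | zero => intro h s _ _ hf; omega
  | succ f ih =>
    intro h s hs hsh hf
    rw [solutionFuel]
    by_cases heq : h = s
    · simp [heq, stir_diag]
    · rw [if_neg heq]
      by_cases hs1 : s = 1
      · rw [if_pos hs1]
        subst hs1
        have h1 : 2 ≤ h := by omega
        unfold pyFact
        rw [if_neg (by omega)]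
        obtain ⟨m, hm⟩ : ∃ m, h.toNat = m + 1 := ⟨h.toNat - 1, by omega⟩
        rw [show (h - 1).toNat = m by omega, hm]
        exact (stir_one m).symm
      · rw [if_neg hs1]
        have hs2 : 2 ≤ s := by omega
        have hlt : s < h := lt_of_le_of_ne hsh (fun e => heq e.symm)
        set k := s.toNat with hk
        set d := h.toNat - s.toNat with hd
        have hm : (h - s + 1).toNat = d + 1 := by omega
        rw [hm, foldl_add_eq_sum]
        have hcongr : List.map
            (fun (j : Nat) => solutionFuel f (h - 1 - (j : Int)) (s - 1) * pyComb (h - 1) (j : Int) * pyFact (j : Int))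
            (List.range (d + 1))
            = List.map
            (fun j => stirling (k + d - 1 - j) (k - 1) * (Nat.choose (k + d - 1) j : Int) * (Nat.factorial j : Int))
            (List.range (d + 1)) := by
          apply List.map_congr_left
          intro j hj
          have hj' : j < d + 1 := List.mem_range.mp hj
          have hrec : solutionFuel f (h - 1 - (j : Int)) (s - 1) = stirling (k + d - 1 - j) (k - 1) := by
            rw [ih (h - 1 - (j : Int)) (s - 1) (by omega) (by omega) (by omega)]
            congr 1 <;> omega
          have hcomb : pyComb (h - 1) (j : Int) = (Nat.choose (k + d - 1) j : Int) := by
            unfold pyComb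
            rw [if_neg (by omega)]
            congr 2 <;> omega
          have hfactj : pyFact (j : Int) = (Nat.factorial j : Int) := by
            unfold pyFact
            rw [if_neg (by omega)]
            simp
          rw [hrec, hcomb, hfactj]
        have hh : h.toNat = k + d := by omega
        rw [hcongr, stir_sum k d (by omega), hh]
        omega

-- the row maintained by B's DP, as a function of the number of processed rows
theorem alt_row (sN : Nat) : ∀ (m : Nat),
    (List.range' 1 m).foldl
      (fun (row : List Int) (n : Nat) =>
        0 :: (List.range' 1 sN).map
          (fun k => row.getD (k - 1) 0 + ((n : Int) - 1) * row.getD k 0))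
      (1 :: List.replicate sN 0)
    = (List.range (sN + 1)).map (fun k => stirling m k) := by
  intro m
  induction m with
  | zero =>
    rw [List.range'_zero, List.foldl_nil, List.range_succ_eq_map, List.map_cons, List.map_map]
    rw [show stirling 0 0 = 1 from rfl]
    congr 1
    have : List.map ((fun k => stirling 0 k) ∘ Nat.succ) (List.range sN)
        = List.map (fun _ => (0 : Int)) (List.range sN) := by
      apply List.map_congr_left
      intro j _
      rfl
    rw [this, List.map_const', List.length_range]
  | succ m ih =>
    rw [List.range'_concat, List.foldl_append, ih, List.foldl_cons, List.foldl_nil]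
    have hn : ((1 + 1 * m : Nat) : Int) - 1 = (m : Int) := by push_cast; ring
    conv_rhs => rw [List.range_succ_eq_map (n := sN), List.map_cons, List.map_map]
    congr 1
    rw [List.range'_eq_map_range, List.map_map]
    apply List.map_congr_left
    intro j hj
    have hj' : j < sN := List.mem_range.mp hj
    simp only [Function.comp, Nat.succ_eq_add_one, hn]
    have h1 : (List.map (fun k => stirling m k) (List.range (sN + 1))).getD (1 + j - 1) 0 = stirling m j := by
      rw [show 1 + j - 1 = j by omega, PySem.List.getD_map_range _ _ _ _ (by omega)]
    have h2 : (List.map (fun k => stirling m k) (List.range (sN + 1))).getD (1 + j) 0 = stirling m (j + 1) := by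
      rw [show 1 + j = j + 1 by omega, PySem.List.getD_map_range _ _ _ _ (by omega)]
    rw [h1, h2]
    rfl

theorem alt_eq (h s : Int) (hs : 1 ≤ s) (hsh : s ≤ h) :
    solution_alt h s = stirling h.toNat s.toNat := by
  unfold solution_alt
  by_cases heq : h = s
  · rw [if_pos heq, heq, stir_diag]
  · rw [if_neg heq, if_neg (by omega), alt_row s.toNat h.toNat,
      PySem.List.getD_map_range _ _ _ _ (by omega)]

-- ===== VERDICT (by name: the statement is the Claim_ definition above) =====
theorem solution_spec : Claim_equal_solution := by
  unfold Claim_equal_solution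
  intro h s _ hpre
  unfold Spec_solution solution
  by_cases heq : h = s
  · subst heq
    rw [solutionFuel, if_pos rfl]
    unfold solution_alt
    rw [if_pos rfl]
  · rcases hpre with heq' | ⟨h1, h2⟩ | ⟨h1, h2⟩
    · exact absurd heq' heq
    · rw [fuel_eq (s.toNat + 1) h s h1 h2 (by omega), alt_eq h s h1 h2]
    · -- h < s, s ≠ 1: A's loop is empty (returns 0), B's guard returns 0
      rw [solutionFuel, if_neg heq, if_neg h2, show ((h - s + 1).toNat) = 0 by omega]
      unfold solution_alt
      rw [if_neg heq, if_pos (by omega)]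
      rfl
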